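-- pv_equiv track=rewrite | github.com/Carlososuna11/codewars-handbook | python/kata/1-kyu/N queens problem (with one mandatory queen position) - challenge version/solution.py | less6
-- ===== SOURCE A (Python) =====
-- def prometedor(A,K):
--    for j in range(K):
--       if (A[j]==A[K]) or (abs(A[j]-A[K])==abs(K-j)):
--          return False
--    return True
--
-- def less6(x,y,n):
--     L = [0 for i in range(n)]
--     L[y] = x
--     stack = [(L,0)]
--     while len(stack) > 0:
--         A,k = stack.pop()
--         if k==n:
--             k=k-1
--             if prometedor(A,k):
--                 return A
--             else:
--                 break
--         else:
--             if k != y: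
--                 for j in range(n):
--                     A[k]=j
--                     if prometedor(A,k):
--                         stack.append((A[:],k+1))
--             else:
--                 if prometedor(A,k):
--                     stack.append((A[:],k+1))
-- ===== SOURCE B (Python) =====
-- def prometedor(A, K):
--     for j in range(K):
--         if (A[j] == A[K]) or (abs(A[j] - A[K]) == abs(K - j)):
--             return False
--     return True
--
--
-- def less6(x, y, n):
--     # Recursive depth-first backtracker over rows instead of an explicit stack.
--     # Rows are filled in order 0..n-1; row y keeps its mandatory queen x.
--     # Columns are tried from n-1 down to 0, which yields the same solution the
--     # LIFO stack of the original produces.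
--     A = [0] * n
--     A[y] = x
--
--     def place(A, k):
--         if k == n:
--             return A
--         if k == y:
--             return place(A, k + 1) if prometedor(A, k) else None
--         for j in range(n - 1, -1, -1):
--             B = A[:]
--             B[k] = j
--             if prometedor(B, k):
--                 r = place(B, k + 1)
--                 if r is not None:
--                     return r
--         return None
--
--     return place(A, 0)
-- ===== Notes on version B (the rewrite author's own statement) =====
-- stated objective: alternative
-- what changed: Replaces the explicit LIFO stack of pending board states with a recursive row-by-row backtracker that tries columns n-1 down to 0 (matching the stack's pop order) and returns the first completed board.
import Mathlib
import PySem

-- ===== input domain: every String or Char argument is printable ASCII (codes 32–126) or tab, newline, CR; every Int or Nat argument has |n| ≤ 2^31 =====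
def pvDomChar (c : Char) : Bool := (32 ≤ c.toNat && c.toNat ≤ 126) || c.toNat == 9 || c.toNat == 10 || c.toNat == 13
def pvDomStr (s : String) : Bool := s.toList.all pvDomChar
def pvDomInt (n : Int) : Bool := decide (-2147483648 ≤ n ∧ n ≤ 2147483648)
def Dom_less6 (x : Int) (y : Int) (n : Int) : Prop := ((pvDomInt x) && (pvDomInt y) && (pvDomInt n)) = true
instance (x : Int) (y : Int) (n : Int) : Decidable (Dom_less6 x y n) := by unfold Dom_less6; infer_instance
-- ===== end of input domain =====

-- B replaces A's explicit LIFO stack of pending board states by a recursive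
-- row-by-row backtracker (columns tried from n-1 down to 0, matching the
-- stack's pop order); prometedor is shared by both, as in the two Pythons.

-- ===== PORT A =====

-- prometedor(A,K): the early-return-False loop is exactly a List.all over range(K).
-- Indices j < K and K are in range on every call both ports make, so pyGetD is exact there.
def prometedor (A : List Int) (K : Int) : Bool :=
  (PySem.List.pyRange 0 K 1).all (fun j =>
    !((PySem.List.pyGetD A j 0 == PySem.List.pyGetD A K 0) ||
      ((PySem.List.pyGetD A j 0 - PySem.List.pyGetD A K 0).natAbs == (K - j).natAbs)))

-- The while-loop over the stack, made total by fuel (less6 passes enough fuel for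
-- the whole search, proved below; the fuel is a totality device only).
-- The stack's top is the head; Python's append becomes cons, so the j-loop is a
-- foldl consing each promising copy.  Python mutates A[k] in place and pushes
-- copies; each iteration only overwrites index k, so the per-iteration pySetD
-- copies are exactly the lists Python pushes.
def less6Loop (y : Int) (n : Int) : Nat → List (List Int × Int) → Option (List Int)
  | 0, _ => none
  | _ + 1, [] => none
  | fuel + 1, (A, k) :: rest =>
    if k = n then
      (if prometedor A (k - 1) then some A else none)  -- break: falls out → None
    else if k ≠ y then
      less6Loop y n fuel ((PySem.List.pyRange 0 n 1).foldl
        (fun st j =>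
          let A' := PySem.List.pySetD A k j
          if prometedor A' k then (A', k + 1) :: st else st) rest)
    else
      if prometedor A k then less6Loop y n fuel ((A, k + 1) :: rest)
      else less6Loop y n fuel rest

def less6 (x : Int) (y : Int) (n : Int) : Option (List Int) :=
  let L := PySem.List.pySetD (List.replicate n.toNat 0) y x
  less6Loop y n ((n.toNat + 2) ^ (n.toNat + 1)) [(L, 0)]

-- ===== PORT B =====

-- place(A,k) of Source B; the fuel g is a totality device (n.toNat+1 covers the n+1
-- recursion levels).  The for-loop with early return over range(n-1,-1,-1) is
-- List.findSome?.
def place (y : Int) (n : Int) : Nat → List Int → Int → Option (List Int)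
  | 0, A, k => if k = n then some A else none
  | g + 1, A, k =>
    if k = n then some A
    else if k = y then (if prometedor A k then place y n g A (k + 1) else none)
    else
      (PySem.List.pyRange (n - 1) (-1) (-1)).findSome? (fun j =>
        let B := PySem.List.pySetD A k j
        if prometedor B k then place y n g B (k + 1) else none)

def less6_alt (x : Int) (y : Int) (n : Int) : Option (List Int) :=
  let A := PySem.List.pySetD (List.replicate n.toNat 0) y x
  place y n (n.toNat + 1) A 0

-- ===== PRECONDITION & SPEC =====
-- Pre_ excludes exactly the inputs where Python A raises IndexError at L[y] = x
-- (n < 1 gives an empty board, |y| out of range): both A and B raise there.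
def Pre_less6 (x : Int) (y : Int) (n : Int) : Prop := 1 ≤ n ∧ -n ≤ y ∧ y < n
instance (x : Int) (y : Int) (n : Int) : Decidable (Pre_less6 x y n) := by unfold Pre_less6; infer_instance
def pvWitness_less6 : Int × Int × Int := (1, 0, 4)

def Spec_less6 (x : Int) (y : Int) (n : Int) (out : Option (List Int)) : Prop := out = less6_alt x y n
instance (x : Int) (y : Int) (n : Int) (out : Option (List Int)) : Decidable (Spec_less6 x y n out) := by unfold Spec_less6; infer_instance

-- ===== CLAIM (what is proved, stated in full; the proofs are below) =====
def Claim_equal_less6 : Prop := ∀ (x : Int) (y : Int) (n : Int), Dom_less6 x y n → Pre_less6 x y n → Spec_less6 x y n (less6 x y n)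

-- ===== LEMMAS AND PROOFS =====

-- B's search applied to each stack entry in turn: the reference semantics of A's stack.
def runB (y : Int) (n : Int) : List (List Int × Int) → Option (List Int)
  | [] => none
  | (A, k) :: rest =>
    match place y n (n.toNat + 1) A k with
    | some r => some r
    | none => runB y n rest

-- fuel budget of one stack entry / of a stack
def wt (n : Int) (s : List Int × Int) : Nat := (n.toNat + 2) ^ ((n + 1 - s.2).toNat)
def needed (n : Int) (S : List (List Int × Int)) : Nat := (S.map (wt n)).sum

-- invariant of every reachable stack entry
def GoodSt (n : Int) (s : List Int × Int) : Prop :=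
  0 ≤ s.2 ∧ s.2 ≤ n ∧ (s.2 = n → prometedor s.1 (n - 1) = true)

-- the one-step body of A's push loop
def pushStep (k : Int) (A : List Int) (st : List (List Int × Int)) (j : Int) : List (List Int × Int) :=
  if prometedor (PySem.List.pySetD A k j) k then (PySem.List.pySetD A k j, k + 1) :: st else st


theorem place_unfold (y n : Int) (g : Nat) (A : List Int) (k : Int) :
    place y n (g + 1) A k =
      if k = n then some A
      else if k = y then (if prometedor A k then place y n g A (k + 1) else none)
      else
        (PySem.List.pyRange (n - 1) (-1) (-1)).findSome? (fun j =>
          let B := PySem.List.pySetD A k j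
          if prometedor B k then place y n g B (k + 1) else none) := rfl

theorem loop_unfold (y n : Int) (f : Nat) (A : List Int) (k : Int)
    (rest : List (List Int × Int)) :
    less6Loop y n (f + 1) ((A, k) :: rest) =
      if k = n then (if prometedor A (k - 1) then some A else none)
      else if k ≠ y then
        less6Loop y n f ((PySem.List.pyRange 0 n 1).foldl (pushStep k A) rest)
      else
        if prometedor A k then less6Loop y n f ((A, k + 1) :: rest)
        else less6Loop y n f rest := rfl

theorem place_gt (y n : Int) (g : Nat) (A : List Int) (k : Int)
    (h : n < k) : place y n g A k = none := by
  induction g generalizing A k with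
  | zero => simp [place, show ¬(k = n) by omega]
  | succ g ih =>
    rw [place_unfold, if_neg (show ¬(k = n) by omega)]
    by_cases hy : k = y
    · rw [if_pos hy, ih A (k + 1) (by omega)]
      simp
    · rw [if_neg hy]
      apply List.findSome?_eq_none_iff.mpr
      intro j _
      simp [ih _ (k + 1) (by omega)]

theorem place_succ (y n : Int) (g : Nat) (A : List Int) (k : Int)
    (hk : 0 ≤ k) (hg : (n - k).toNat ≤ g) :
    place y n g A k = place y n (g + 1) A k := by
  induction g generalizing A k with
  | zero =>
    by_cases h : k = n
    · simp [place, h]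
    · rw [place_gt y n 0 A k (by omega), place_gt y n 1 A k (by omega)]
  | succ g ih =>
    by_cases h : k = n
    · simp [place_unfold, h]
    · by_cases hlt : n < k
      · rw [place_gt y n _ A k hlt, place_gt y n _ A k hlt]
      · have hk1 : (n - (k + 1)).toNat ≤ g := by omega
        rw [place_unfold, place_unfold, if_neg h, if_neg h]
        by_cases hy : k = y
        · rw [if_pos hy, if_pos hy, ih A (k + 1) (by omega) hk1]
        · rw [if_neg hy, if_neg hy]
          congr 1
          funext j
          simp only
          rw [ih _ (k + 1) (by omega) hk1]

theorem place_at_n (y n : Int) (g : Nat) (A : List Int) : place y n g A n = some A := by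
  cases g <;> simp [place]

theorem mem_pushStep_foldl (k : Int) (A : List Int) :
    ∀ (js : List Int) (st : List (List Int × Int)) (s : List Int × Int),
      s ∈ js.foldl (pushStep k A) st →
      s ∈ st ∨ ∃ j, prometedor (PySem.List.pySetD A k j) k = true ∧
        s = (PySem.List.pySetD A k j, k + 1) := by
  intro js
  induction js with
  | nil => intro st s h; exact Or.inl h
  | cons j js ih =>
    intro st s h
    rcases ih (pushStep k A st j) s h with h' | h'
    · unfold pushStep at h'
      by_cases hc : prometedor (PySem.List.pySetD A k j) k = true
      · rw [if_pos hc] at h'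
        rcases List.mem_cons.mp h' with rfl | h''
        · exact Or.inr ⟨j, hc, rfl⟩
        · exact Or.inl h''
      · rw [if_neg hc] at h'
        exact Or.inl h'
    · exact Or.inr h'

theorem needed_pushStep_foldl (n k : Int) (A : List Int) :
    ∀ (js : List Int) (st : List (List Int × Int)),
      needed n (js.foldl (pushStep k A) st) ≤
        needed n st + js.length * (n.toNat + 2) ^ ((n - k).toNat) := by
  intro js
  induction js with
  | nil => intro st; simp
  | cons j js ih =>
    intro st
    have h1 := ih (pushStep k A st j)
    have h2 : needed n (pushStep k A st j) ≤ needed n st + (n.toNat + 2) ^ ((n - k).toNat) := by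
      unfold pushStep
      by_cases hc : prometedor (PySem.List.pySetD A k j) k = true
      · rw [if_pos hc]
        have hwt : wt n (PySem.List.pySetD A k j, k + 1) = (n.toNat + 2) ^ ((n - k).toNat) := by
          unfold wt; congr 1; omega
        simp only [needed, List.map_cons, List.sum_cons, hwt]
        omega
      · rw [if_neg hc]
        omega
    simp only [List.foldl_cons, List.length_cons]
    calc needed n (js.foldl (pushStep k A) (pushStep k A st j))
        ≤ needed n (pushStep k A st j) + js.length * (n.toNat + 2) ^ ((n - k).toNat) := h1
      _ ≤ needed n st + (js.length + 1) * (n.toNat + 2) ^ ((n - k).toNat) := by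
          rw [add_mul, one_mul]; omega

-- the candidate function B tries at row k (k ≠ y)
def tryCol (y n k : Int) (A : List Int) (j : Int) : Option (List Int) :=
  if prometedor (PySem.List.pySetD A k j) k then place y n (n.toNat + 1) (PySem.List.pySetD A k j) (k + 1)
  else none

theorem runB_foldl (y n : Int) (A : List Int) (k : Int) :
    ∀ (js : List Int) (st : List (List Int × Int)),
      runB y n (js.foldl (pushStep k A) st) =
        match (js.reverse).findSome? (tryCol y n k A) with
        | some r => some r
        | none => runB y n st := by
  intro js
  induction js with
  | nil => intro st; simp
  | cons j js ih =>
    intro st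
    simp only [List.foldl_cons, List.reverse_cons]
    rw [ih (pushStep k A st j), List.findSome?_append]
    have hstep : runB y n (pushStep k A st j) =
        match tryCol y n k A j with
        | some r => some r
        | none => runB y n st := by
      unfold pushStep tryCol
      split_ifs with hc <;> rfl
    rw [hstep]
    cases h1 : (js.reverse).findSome? (tryCol y n k A) <;>
      cases h2 : tryCol y n k A j <;>
        simp [h2, Option.or]

-- unfolding place at top fuel, one step, re-fuelled back to the top
theorem place_top_step (y n : Int) (A : List Int) (k : Int)
    (hk0 : 0 ≤ k) (hkn : k < n) :
    place y n (n.toNat + 1) A k =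
      if k = y then (if prometedor A k then place y n (n.toNat + 1) A (k + 1) else none)
      else (PySem.List.pyRange (n - 1) (-1) (-1)).findSome? (tryCol y n k A) := by
  have hfix : ∀ B : List Int, place y n n.toNat B (k + 1) = place y n (n.toNat + 1) B (k + 1) :=
    fun B => place_succ y n n.toNat B (k + 1) (by omega) (by omega)
  conv_lhs => rw [place_unfold]
  rw [if_neg (show ¬(k = n) by omega)]
  by_cases hy : k = y
  · rw [if_pos hy, if_pos hy, hfix]
  · rw [if_neg hy, if_neg hy]
    congr 1
    funext j
    simp only [tryCol]
    rw [hfix]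

theorem sim (y n : Int) (hn : 1 ≤ n) :
    ∀ (f : Nat) (S : List (List Int × Int)),
      (∀ s ∈ S, GoodSt n s) → needed n S ≤ f →
      less6Loop y n f S = runB y n S := by
  intro f
  induction f with
  | zero =>
    intro S hInv hf
    cases S with
    | nil => rfl
    | cons s S' =>
      exfalso
      have : 1 ≤ wt n s := Nat.one_le_pow _ _ (by omega)
      simp [needed] at hf
      omega
  | succ f ih =>
    intro S hInv hf
    cases S with
    | nil => rfl
    | cons s rest =>
      obtain ⟨A, k⟩ := s
      obtain ⟨hk0, hkn, hpr⟩ := hInv (A, k) (List.mem_cons_self ..)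
      have hrest : ∀ s ∈ rest, GoodSt n s := fun s hs => hInv s (List.mem_cons_of_mem _ hs)
      have hpow1 : 1 ≤ (n.toNat + 2) ^ ((n - k).toNat) := Nat.one_le_pow _ _ (by omega)
      have hfS : wt n (A, k) + needed n rest ≤ f + 1 := by
        simpa [needed] using hf
      have hrunB : runB y n ((A, k) :: rest) =
          match place y n (n.toNat + 1) A k with
          | some r => some r
          | none => runB y n rest := rfl
      rw [loop_unfold]
      by_cases hkeq : k = n
      · subst hkeq
        rw [if_pos rfl, hrunB, place_at_n, if_pos (hpr rfl)]
      · have hklt : k < n := by omega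
        rw [if_neg hkeq, hrunB, place_top_step y n A k hk0 hklt]
        have hwt : wt n (A, k) = (n.toNat + 2) * (n.toNat + 2) ^ ((n - k).toNat) := by
          unfold wt
          rw [show (n + 1 - k).toNat = (n - k).toNat + 1 by omega, pow_succ]
          ring
        by_cases hy : k = y
        · rw [if_neg (show ¬(k ≠ y) by simpa using hy), if_pos hy]
          by_cases hc : prometedor A k = true
          · rw [if_pos hc, if_pos hc]
            have hInv' : ∀ s ∈ (A, k + 1) :: rest, GoodSt n s := by
              intro s hs
              rcases List.mem_cons.mp hs with rfl | hs
              · refine ⟨by omega, by omega, fun hkn1 => ?_⟩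
                rw [show n - 1 = k by omega]
                exact hc
              · exact hrest s hs
            have hneed : needed n ((A, k + 1) :: rest) ≤ f := by
              have hwt1 : wt n (A, k + 1) = (n.toNat + 2) ^ ((n - k).toNat) := by
                unfold wt; congr 1; omega
              simp only [needed, List.map_cons, List.sum_cons, hwt1]
              simp only [needed] at hfS
              nlinarith [hpow1]
            rw [ih ((A, k + 1) :: rest) hInv' hneed]
            rfl
          · rw [if_neg hc, if_neg hc]
            refine ih rest hrest ?_
            have hw1 : 1 ≤ wt n (A, k) := Nat.one_le_pow _ _ (by omega)
            simp only [needed] at hfS ⊢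
            omega
        · rw [if_pos (show k ≠ y from hy), if_neg hy]
          have hlen : (PySem.List.pyRange 0 n 1).length = n.toNat := by
            rw [PySem.List.length_pyRange_one]; congr 1; omega
          have hInv' : ∀ s ∈ (PySem.List.pyRange 0 n 1).foldl (pushStep k A) rest, GoodSt n s := by
            intro s hs
            rcases mem_pushStep_foldl k A _ rest s hs with hs' | ⟨j, hcj, rfl⟩
            · exact hrest s hs'
            · refine ⟨by omega, by omega, fun hkn1 => ?_⟩
              rw [show n - 1 = k by omega]
              exact hcj
          have hneed : needed n ((PySem.List.pyRange 0 n 1).foldl (pushStep k A) rest) ≤ f := by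
            have h1 := needed_pushStep_foldl n k A (PySem.List.pyRange 0 n 1) rest
            rw [hlen] at h1
            simp only [needed] at hfS h1 ⊢
            nlinarith [hpow1]
          rw [ih _ hInv' hneed, runB_foldl y n A k (PySem.List.pyRange 0 n 1) rest]
          have hrev : (PySem.List.pyRange 0 n 1).reverse = PySem.List.pyRange (n - 1) (-1) (-1) := by
            rw [PySem.List.pyRange_neg_one_eq_reverse]
            norm_num
          rw [hrev]

theorem main_eq (x y n : Int) (h : Pre_less6 x y n) : less6 x y n = less6_alt x y n := by
  obtain ⟨hn, hy1, hy2⟩ := h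
  unfold less6 less6_alt
  have hGood : ∀ s ∈ [((PySem.List.pySetD (List.replicate n.toNat 0) y x), (0 : Int))], GoodSt n s := by
    intro s hs
    simp only [List.mem_singleton] at hs
    subst hs
    exact ⟨le_refl 0, by omega, fun h0 => absurd h0 (by omega)⟩
  have hneed : needed n [((PySem.List.pySetD (List.replicate n.toNat 0) y x), (0 : Int))] ≤
      (n.toNat + 2) ^ (n.toNat + 1) := by
    simp only [needed, List.map_cons, List.map_nil, List.sum_cons, List.sum_nil, add_zero, wt]
    have h01 : (n + 1 - 0).toNat = n.toNat + 1 := by omega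
    rw [h01]
  rw [sim y n hn _ _ hGood hneed]
  show runB y n [((PySem.List.pySetD (List.replicate n.toNat 0) y x), (0 : Int))] = _
  simp only [runB]
  cases hp : place y n (n.toNat + 1) (PySem.List.pySetD (List.replicate n.toNat 0) y x) 0 <;> rfl

-- ===== VERDICT (by name: the statement is the Claim_ definition above) =====
theorem less6_spec : Claim_equal_less6 := by
  intro x y n _ hpre
  unfold Spec_less6
  exact main_eq x y n hpre
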